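-- pv_equiv track=rewrite | github.com/jhnmrtnssn/advent-of-code | 2023/day13/part1.py | cluster_rows_to_int
-- ===== SOURCE A (Python) =====
-- def cluster_rows_to_int(cluster):
--     row_values = []
--     for line in cluster:
--         value = 0
--         for i, char in enumerate(reversed(line)):
--             if char == "#":
--                 value += 2**i
--         row_values.append(value)
--     return row_values
-- ===== SOURCE B (Python) =====
-- def cluster_rows_to_int(cluster):
--     def row_value(line):
--         if not line:
--             return 0
--         rest = line[1:]
--         return (line[0] == "#") * 2 ** len(rest) + row_value(rest)
--     return [row_value(line) for line in cluster]
-- ===== Notes on version B (the rewrite author's own statement) =====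
-- stated objective: alternative
-- what changed: Replaces A's append loop with reversed-enumerate power sum by a list comprehension over a recursive helper that splits each line into head and tail, contributing bit*2**len(rest) per head; no enumerate, no reversed, no mutable accumulators.
import Mathlib
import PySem

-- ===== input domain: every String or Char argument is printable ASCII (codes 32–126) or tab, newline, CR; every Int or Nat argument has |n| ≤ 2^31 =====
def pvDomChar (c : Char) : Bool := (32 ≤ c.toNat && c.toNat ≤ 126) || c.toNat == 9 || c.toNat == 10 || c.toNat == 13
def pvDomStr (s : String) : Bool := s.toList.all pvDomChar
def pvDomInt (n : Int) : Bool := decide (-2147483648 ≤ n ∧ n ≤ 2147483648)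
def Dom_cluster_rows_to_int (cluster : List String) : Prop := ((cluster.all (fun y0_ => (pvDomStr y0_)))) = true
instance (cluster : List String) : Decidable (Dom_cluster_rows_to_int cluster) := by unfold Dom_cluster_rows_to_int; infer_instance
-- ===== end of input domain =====

-- B replaces A's imperative append loop and reversed-enumerate power sum by a list
-- comprehension over a recursive head/tail helper (bit * 2^len(rest) + value(rest)); same cost class.

-- ===== PORT A =====
-- for line in cluster: value = 0; for i, char in enumerate(reversed(line)): if char == '#': value += 2**i; append
def cluster_rows_to_int (cluster : List String) : List Int :=
  cluster.foldl (fun row_values line =>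
    row_values ++ [(PySem.List.enumerate line.toList.reverse 0).foldl
      (fun value ic => if ic.2 = '#' then value + 2 ^ ic.1.toNat else value) 0]) []

-- ===== PORT B =====
-- row_value(line): 0 if empty else (line[0] == '#') * 2**len(line[1:]) + row_value(line[1:])
def pvRowValue : List Char → Int
  | [] => 0
  | c :: rest => (if c = '#' then 1 else 0) * 2 ^ rest.length + pvRowValue rest

def cluster_rows_to_int_alt (cluster : List String) : List Int :=
  cluster.map (fun line => pvRowValue line.toList)

-- ===== PRECONDITION & SPEC =====
def Spec_cluster_rows_to_int (cluster : List String) (out : List Int) : Prop := out = cluster_rows_to_int_alt cluster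
instance (cluster : List String) (out : List Int) : Decidable (Spec_cluster_rows_to_int cluster out) := by unfold Spec_cluster_rows_to_int; infer_instance

-- ===== CLAIM (what is proved, stated in full; the proofs are below) =====
def Claim_equal_cluster_rows_to_int : Prop := ∀ (cluster : List String), Dom_cluster_rows_to_int cluster → Spec_cluster_rows_to_int cluster (cluster_rows_to_int cluster)

-- ===== LEMMAS AND PROOFS =====

-- A's inner loop from accumulator a adds pvRowValue of the (un-reversed) line.
theorem foldlA_acc (l : List Char) (a : Int) :
    (PySem.List.enumerate l.reverse 0).foldl
        (fun value ic => if ic.2 = '#' then value + 2 ^ ic.1.toNat else value) a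
      = a + pvRowValue l := by
  induction l generalizing a with
  | nil => simp [PySem.List.enumerate_nil, pvRowValue]
  | cons c t ih =>
    have h1 : (c :: t).reverse = t.reverse ++ [c] := by simp
    rw [h1, PySem.List.enumerate_append, List.foldl_append, ih]
    simp only [PySem.List.enumerate_cons, PySem.List.enumerate_nil, List.foldl_cons,
      List.foldl_nil, List.length_reverse, pvRowValue]
    split_ifs <;> simp <;> ring

-- A's outer append loop builds acc ++ the mapped values.
theorem foldlA_outer (cluster : List String) (acc : List Int) :
    cluster.foldl (fun row_values line =>
      row_values ++ [(PySem.List.enumerate line.toList.reverse 0).foldl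
        (fun value ic => if ic.2 = '#' then value + 2 ^ ic.1.toNat else value) 0]) acc
      = acc ++ cluster.map (fun line => pvRowValue line.toList) := by
  induction cluster generalizing acc with
  | nil => simp
  | cons s t ih => rw [List.foldl_cons, ih]; simp [foldlA_acc]

-- ===== VERDICT (by name: the statement is the Claim_ definition above) =====
theorem cluster_rows_to_int_spec : Claim_equal_cluster_rows_to_int := by
  intro cluster _
  unfold Spec_cluster_rows_to_int cluster_rows_to_int cluster_rows_to_int_alt
  simpa using foldlA_outer cluster []
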